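-- pv_equiv track=rewrite | github.com/llouis0622/AI_Everything | 1. 기초 수학 및 프로그래밍/1. 수학 기초/1. 선형대수학/02. 행렬 기초/bidiagonal matrix.py | l_bidiag
-- ===== SOURCE A (Python) =====
-- def l_bidiag(A):
--     n = len(A)
--     p = len(A[0])
--     res = []
--     for i in range(n):
--         row = []
--         for j in range(p):
--             if i < j or i - j > 1:
--                 row.append(0)
--             else:
--                 row.append(A[i][j])
--         res.append(row)
--     return res
-- ===== SOURCE B (Python) =====
-- def l_bidiag(A):
--     p = len(A[0])
--     res = []
--     for i in range(len(A)):
--         row = [0] * p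
--         if i < p:
--             row[i] = A[i][i]
--         if 1 <= i <= p:
--             row[i - 1] = A[i][i - 1]
--         res.append(row)
--     return res
-- ===== Notes on version B (the rewrite author's own statement) =====
-- stated objective: simpler
-- what changed: Instead of testing every cell with the i<j or i-j>1 branch in a nested loop, B bulk-allocates zero rows ([0]*p) and writes only the at-most-two band entries per row by direct indexing, removing the per-cell branch and append.
import Mathlib
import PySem

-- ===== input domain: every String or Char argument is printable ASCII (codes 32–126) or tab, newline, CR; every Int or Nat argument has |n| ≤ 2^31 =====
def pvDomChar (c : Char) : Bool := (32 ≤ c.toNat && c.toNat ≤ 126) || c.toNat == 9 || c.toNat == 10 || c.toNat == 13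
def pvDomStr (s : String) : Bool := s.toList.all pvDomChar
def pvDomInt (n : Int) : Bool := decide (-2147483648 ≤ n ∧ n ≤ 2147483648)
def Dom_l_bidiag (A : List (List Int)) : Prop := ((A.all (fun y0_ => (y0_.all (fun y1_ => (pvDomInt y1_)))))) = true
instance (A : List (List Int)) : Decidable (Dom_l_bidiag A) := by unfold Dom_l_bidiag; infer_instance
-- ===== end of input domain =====

-- B builds each row as a zero row and writes only the band entries (diagonal and
-- subdiagonal) by direct indexing, instead of A's full inner j-loop with a branch
-- at every cell: a simpler decomposition, same asymptotic cost.


-- ===== PORT A =====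
-- row i: for each j in range(p), append 0 if i<j or i-j>1 else A[i][j]
-- (inside Pre_ every A[i][j] access is in range, so getD equals Python's indexing)
def l_bidiag (A : List (List Int)) : List (List Int) :=
  let n := A.length
  let p := (A.headD []).length
  (List.range n).map (fun i =>
    (List.range p).map (fun j =>
      if i < j ∨ i - j > 1 then (0 : Int) else (A.getD i []).getD j 0))

-- ===== PORT B =====
-- row i: zero row of length p, then set the diagonal and subdiagonal entries
def l_bidiag_alt (A : List (List Int)) : List (List Int) :=
  let p := (A.headD []).length
  (List.range A.length).map (fun i =>
    let row := List.replicate p (0 : Int)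
    let row := if i < p then row.set i ((A.getD i []).getD i 0) else row
    if 1 ≤ i ∧ i ≤ p then row.set (i - 1) ((A.getD i []).getD (i - 1) 0) else row)

-- ===== PRECONDITION & SPEC =====
-- Pre_ excludes exactly the inputs on which the Python A raises IndexError: the
-- empty matrix (len(A[0])), and ragged matrices whose row i (for i ≤ p) is shorter
-- than min(i+1,p), so that a band access A[i][i] or A[i][i-1] is out of range.
-- (The Python B raises on exactly the same inputs.)
def Pre_l_bidiag (A : List (List Int)) : Prop :=
  A ≠ [] ∧ ∀ i, i < A.length → i ≤ (A.headD []).length →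
    min (i + 1) ((A.headD []).length) ≤ (A.getD i []).length
instance (A : List (List Int)) : Decidable (Pre_l_bidiag A) := by unfold Pre_l_bidiag; infer_instance

def pvWitness_l_bidiag : List (List Int) := [[1, 2], [3, 4], [5, 6]]

def Spec_l_bidiag (A : List (List Int)) (out : List (List Int)) : Prop := out = l_bidiag_alt A
instance (A : List (List Int)) (out : List (List Int)) : Decidable (Spec_l_bidiag A out) := by unfold Spec_l_bidiag; infer_instance

-- ===== CLAIM (what is proved, stated in full; the proofs are below) =====
def Claim_equal_l_bidiag : Prop := ∀ (A : List (List Int)), Dom_l_bidiag A → Pre_l_bidiag A → Spec_l_bidiag A (l_bidiag A)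

-- ===== LEMMAS AND PROOFS =====

-- row i of A's port equals row i of B's port (holds for every i, p and row a)
theorem l_bidiag_row_eq (p i : ℕ) (a : List Int) :
    (List.range p).map (fun j => if i < j ∨ i - j > 1 then (0 : Int) else a.getD j 0)
    =
    (let row := List.replicate p (0 : Int)
     let row := if i < p then row.set i (a.getD i 0) else row
     if 1 ≤ i ∧ i ≤ p then row.set (i - 1) (a.getD (i - 1) 0) else row) := by
  dsimp only
  by_cases h2 : i < p <;> by_cases h1 : 1 ≤ i ∧ i ≤ p <;>
    [rw [if_pos h2, if_pos h1]; rw [if_pos h2, if_neg h1];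
     rw [if_neg h2, if_pos h1]; rw [if_neg h2, if_neg h1]] <;>
    (apply List.ext_getElem
     · simp
     · intro j hj hj'
       have hjp : j < p := by simpa using hj
       simp only [List.getElem_map, List.getElem_range, List.getElem_set,
         List.getElem_replicate]
       split_ifs <;> subst_vars <;> first | rfl | omega)

-- ===== VERDICT (by name: the statement is the Claim_ definition above) =====
theorem l_bidiag_spec : Claim_equal_l_bidiag := by
  intro A _ _
  unfold Spec_l_bidiag l_bidiag l_bidiag_alt
  exact List.map_congr_left (fun i _ => l_bidiag_row_eq _ i _)
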